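-- pv_equiv track=rewrite | github.com/wuaipinglab/CovRecomb | CovRecomb-Local-Version/scripts/function_set.py | calcul_bk
-- ===== SOURCE A (Python) =====
-- def calcul_bk(lin_A_draw, lin_B_draw, Lineage_v, epiV):
--     feature_SNPA = Lineage_v[lin_A_draw]
--     feature_SNPB = Lineage_v[lin_B_draw]
--     A_B_shared = set(feature_SNPA) & set(feature_SNPB)
--     UA_mutate = (set(feature_SNPA) & set(epiV)) - set(A_B_shared)
--     UB_mutate = (set(feature_SNPB) & set(epiV)) - set(A_B_shared)
--     sample_special = set(epiV) - (set(feature_SNPA) | set(feature_SNPB))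
--
--     UA_mutate_unique = []
--     UB_mutate_unique = []
--     shared_mut = []
--     denovo_mut = []
--
--     lin_record = ""
--     for j in epiV:
--         if j in A_B_shared:
--             shared_mut.append(j)
--         elif j in UA_mutate:
--             UA_mutate_unique.append(j)
--             lin_record = lin_record + "X"
--         elif j in UB_mutate:
--             UB_mutate_unique.append(j)
--             lin_record = lin_record + "Y"
--         elif j in sample_special:
--             denovo_mut.append(j)
--
--     return lin_record, UA_mutate_unique, UB_mutate_unique, shared_mut, denovo_mut
-- ===== SOURCE B (Python) =====
-- def calcul_bk(lin_A_draw, lin_B_draw, Lineage_v, epiV):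
--     setA = set(Lineage_v[lin_A_draw])
--     setB = set(Lineage_v[lin_B_draw])
--     shared_mut = [j for j in epiV if j in setA and j in setB]
--     UA_mutate_unique = [j for j in epiV if j in setA and j not in setB]
--     UB_mutate_unique = [j for j in epiV if j in setB and j not in setA]
--     denovo_mut = [j for j in epiV if j not in setA and j not in setB]
--     lin_record = "".join("X" if j in setA else "Y"
--                          for j in epiV if (j in setA) != (j in setB))
--     return lin_record, UA_mutate_unique, UB_mutate_unique, shared_mut, denovo_mut
-- ===== Notes on version B (the rewrite author's own statement) =====
-- stated objective: simpler
-- what changed: B replaces A's single accumulator loop over four precomputed set-algebra sets by staged declarative passes: each of the four output lists is an independent filter of epiV by two direct membership tests against set(feature_SNPA)/set(feature_SNPB), and lin_record is a join over the exactly-one-side elements; no mutable accumulators and no shared/UA_mutate/UB_mutate/sample_special sets.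
import Mathlib
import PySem

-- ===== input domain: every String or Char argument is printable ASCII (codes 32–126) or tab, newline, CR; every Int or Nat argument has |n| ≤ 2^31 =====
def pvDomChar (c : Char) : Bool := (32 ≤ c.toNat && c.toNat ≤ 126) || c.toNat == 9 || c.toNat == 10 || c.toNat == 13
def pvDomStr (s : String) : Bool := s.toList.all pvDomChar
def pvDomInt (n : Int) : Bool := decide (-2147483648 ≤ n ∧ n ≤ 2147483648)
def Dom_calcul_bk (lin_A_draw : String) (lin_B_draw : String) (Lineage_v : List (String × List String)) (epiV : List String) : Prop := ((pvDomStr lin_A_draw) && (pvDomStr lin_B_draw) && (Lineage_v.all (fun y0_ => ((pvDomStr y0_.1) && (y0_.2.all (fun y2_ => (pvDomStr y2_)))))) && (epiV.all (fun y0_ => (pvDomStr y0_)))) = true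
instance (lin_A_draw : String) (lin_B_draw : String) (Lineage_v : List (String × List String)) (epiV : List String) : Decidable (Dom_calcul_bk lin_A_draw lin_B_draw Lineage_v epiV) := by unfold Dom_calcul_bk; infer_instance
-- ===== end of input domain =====

-- B replaces A's accumulator loop over precomputed set-algebra sets by staged filter passes over epiV plus a join for lin_record (simpler).


-- ===== PORT A =====
def calcul_bk (lin_A_draw : String) (lin_B_draw : String) (Lineage_v : List (String × List String)) (epiV : List String) : String × List String × List String × List String × List String :=
  let d := PySem.Dict.ofList Lineage_v
  match d.get? lin_A_draw, d.get? lin_B_draw with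
  | some feature_SNPA, some feature_SNPB =>
    let A_B_shared := PySem.Set.inter (PySem.Set.ofList feature_SNPA) (PySem.Set.ofList feature_SNPB)
    let UA_mutate := PySem.Set.diff (PySem.Set.inter (PySem.Set.ofList feature_SNPA) (PySem.Set.ofList epiV)) (PySem.Set.ofList A_B_shared)
    let UB_mutate := PySem.Set.diff (PySem.Set.inter (PySem.Set.ofList feature_SNPB) (PySem.Set.ofList epiV)) (PySem.Set.ofList A_B_shared)
    let sample_special := PySem.Set.diff (PySem.Set.ofList epiV) (PySem.Set.union (PySem.Set.ofList feature_SNPA) (PySem.Set.ofList feature_SNPB))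
    epiV.foldl (fun (acc : String × List String × List String × List String × List String) j =>
      let (lin_record, UA_u, UB_u, shared_mut, denovo_mut) := acc
      if PySem.Set.contains A_B_shared j then
        (lin_record, UA_u, UB_u, shared_mut ++ [j], denovo_mut)
      else if PySem.Set.contains UA_mutate j then
        (lin_record ++ "X", UA_u ++ [j], UB_u, shared_mut, denovo_mut)
      else if PySem.Set.contains UB_mutate j then
        (lin_record ++ "Y", UA_u, UB_u ++ [j], shared_mut, denovo_mut)
      else if PySem.Set.contains sample_special j then
        (lin_record, UA_u, UB_u, shared_mut, denovo_mut ++ [j])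
      else acc) ("", [], [], [], [])
  | _, _ => ("", [], [], [], [])  -- Python raises KeyError here; excluded by Pre_

-- ===== PORT B =====
def calcul_bk_alt (lin_A_draw : String) (lin_B_draw : String) (Lineage_v : List (String × List String)) (epiV : List String) : String × List String × List String × List String × List String :=
  let d := PySem.Dict.ofList Lineage_v
  match d.get? lin_A_draw with
  | none => ("", [], [], [], [])  -- KeyError in Python; excluded by Pre_
  | some fA =>
  match d.get? lin_B_draw with
  | none => ("", [], [], [], [])  -- KeyError in Python; excluded by Pre_
  | some fB =>
    let setA := PySem.Set.ofList fA
    let setB := PySem.Set.ofList fB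
    let shared_mut := epiV.filter (fun j => PySem.Set.contains setA j && PySem.Set.contains setB j)
    let UA_mutate_unique := epiV.filter (fun j => PySem.Set.contains setA j && !PySem.Set.contains setB j)
    let UB_mutate_unique := epiV.filter (fun j => PySem.Set.contains setB j && !PySem.Set.contains setA j)
    let denovo_mut := epiV.filter (fun j => !PySem.Set.contains setA j && !PySem.Set.contains setB j)
    let lin_record := PySem.Str.join ""
      ((epiV.filter (fun j => PySem.Set.contains setA j != PySem.Set.contains setB j)).map
        (fun j => if PySem.Set.contains setA j then "X" else "Y"))
    (lin_record, UA_mutate_unique, UB_mutate_unique, shared_mut, denovo_mut)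

-- ===== PRECONDITION & SPEC =====
-- Pre_ excludes exactly the inputs where Python A raises KeyError (a lineage name missing from the dict).
def Pre_calcul_bk (lin_A_draw : String) (lin_B_draw : String) (Lineage_v : List (String × List String)) (epiV : List String) : Prop :=
  ((PySem.Dict.ofList Lineage_v).contains lin_A_draw = true) ∧ ((PySem.Dict.ofList Lineage_v).contains lin_B_draw = true)
instance (lin_A_draw : String) (lin_B_draw : String) (Lineage_v : List (String × List String)) (epiV : List String) : Decidable (Pre_calcul_bk lin_A_draw lin_B_draw Lineage_v epiV) := by unfold Pre_calcul_bk; infer_instance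

def pvWitness_calcul_bk : String × String × (List (String × List String)) × List String :=
  ("A", "B", [("A", ["C1", "C2"]), ("B", ["C2", "C3"])], ["C1", "C2", "C4"])

def Spec_calcul_bk (lin_A_draw : String) (lin_B_draw : String) (Lineage_v : List (String × List String)) (epiV : List String) (out : String × List String × List String × List String × List String) : Prop := out = calcul_bk_alt lin_A_draw lin_B_draw Lineage_v epiV
instance (lin_A_draw : String) (lin_B_draw : String) (Lineage_v : List (String × List String)) (epiV : List String) (out : String × List String × List String × List String × List String) : Decidable (Spec_calcul_bk lin_A_draw lin_B_draw Lineage_v epiV out) := by unfold Spec_calcul_bk; infer_instance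

-- ===== CLAIM (what is proved, stated in full; the proofs are below) =====
def Claim_equal_calcul_bk : Prop := ∀ (lin_A_draw : String) (lin_B_draw : String) (Lineage_v : List (String × List String)) (epiV : List String), Dom_calcul_bk lin_A_draw lin_B_draw Lineage_v epiV → Pre_calcul_bk lin_A_draw lin_B_draw Lineage_v epiV → Spec_calcul_bk lin_A_draw lin_B_draw Lineage_v epiV (calcul_bk lin_A_draw lin_B_draw Lineage_v epiV)

-- ===== LEMMAS AND PROOFS =====

-- the simple per-element step A's fold reduces to on elements of epiV
def pvStep (sA sB : PySem.Set String)
    (acc : String × List String × List String × List String × List String) (j : String) :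
    String × List String × List String × List String × List String :=
  let (r, ua, ub, sh, dn) := acc
  if PySem.Set.contains sA j && PySem.Set.contains sB j then (r, ua, ub, sh ++ [j], dn)
  else if PySem.Set.contains sA j then (r ++ "X", ua ++ [j], ub, sh, dn)
  else if PySem.Set.contains sB j then (r ++ "Y", ua, ub ++ [j], sh, dn)
  else (r, ua, ub, sh, dn ++ [j])

theorem join_nil_cons (s : String) (rest : List String) :
    PySem.Str.join "" (s :: rest) = s ++ PySem.Str.join "" rest := by
  cases rest with
  | nil => simp [PySem.Str.join, PySem.Chars.join, List.intercalate]
  | cons t ts =>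
    simp only [PySem.Str.join, List.map_cons]
    rw [show ("" : String).toList = ([] : List Char) from rfl]
    rw [PySem.Chars.join_cons_cons]
    simp [String.ofList_append]

theorem pvFold_stage (sA sB : PySem.Set String) (l : List String)
    (r : String) (ua ub sh dn : List String) :
    l.foldl (pvStep sA sB) (r, ua, ub, sh, dn) =
      (r ++ PySem.Str.join ""
          ((l.filter (fun j => PySem.Set.contains sA j != PySem.Set.contains sB j)).map
            (fun j => if PySem.Set.contains sA j then "X" else "Y")),
       ua ++ l.filter (fun j => PySem.Set.contains sA j && !PySem.Set.contains sB j),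
       ub ++ l.filter (fun j => PySem.Set.contains sB j && !PySem.Set.contains sA j),
       sh ++ l.filter (fun j => PySem.Set.contains sA j && PySem.Set.contains sB j),
       dn ++ l.filter (fun j => !PySem.Set.contains sA j && !PySem.Set.contains sB j)) := by
  induction l generalizing r ua ub sh dn with
  | nil => simp [PySem.Str.join, PySem.Chars.join, List.intercalate]
  | cons j t ih =>
    simp only [List.foldl_cons]
    by_cases hA : j ∈ sA <;> by_cases hB : j ∈ sB <;>
      simp [pvStep, hA, hB, ih, join_nil_cons, List.append_assoc,
            String.append_assoc]

-- ===== VERDICT (by name: the statement is the Claim_ definition above) =====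
theorem calcul_bk_spec : Claim_equal_calcul_bk := by
  intro la lb LV epiV _ _
  unfold Spec_calcul_bk calcul_bk calcul_bk_alt
  cases hA : (PySem.Dict.ofList LV).get? la with
  | none => cases hB : (PySem.Dict.ofList LV).get? lb <;> simp only [hA, hB]
  | some fA =>
    cases hB : (PySem.Dict.ofList LV).get? lb with
    | none => simp only [hA, hB]
    | some fB =>
      simp only [hA, hB]
      rw [show (epiV.foldl _ ("", [], [], [], []) : String × List String × List String × List String × List String) =
            epiV.foldl (pvStep (PySem.Set.ofList fA) (PySem.Set.ofList fB)) ("", [], [], [], []) from ?_]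
      · rw [pvFold_stage]
        simp
      · apply PySem.List.foldl_congr_mem
        intro acc j hj
        obtain ⟨r, ua, ub, sh, dn⟩ := acc
        by_cases hja : j ∈ fA <;> by_cases hjb : j ∈ fB <;>
          simp [pvStep, PySem.Set.mem_inter, PySem.Set.mem_diff,
                PySem.Set.mem_union, PySem.Set.mem_ofList, hja, hjb, hj]
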